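-- pv_equiv track=rewrite | github.com/hoya04/Backjun | 백준/Silver/16969. 차량 번호판 2/차량 번호판 2.py | count_license_plates
-- ===== SOURCE A (Python) =====
-- MOD = 1000000009  # 나머지 연산에 사용할 상수
--
-- def count_license_plates(pattern):
--     """
--     입력된 패턴에 따라 가능한 번호판의 개수를 계산합니다.
--
--     Args:
--         pattern (str): 번호판 패턴 ('c'는 알파벳, 'd'는 숫자)
--
--     Returns:
--         int: 가능한 번호판의 총 개수를 1,000,000,009로 나눈 나머지
--     """
--     # 첫 문자에 대한 경우의 수 초기화
--     if pattern[0] == 'd':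
--         result = 10  # 숫자는 10가지 (0-9)
--     else:  # pattern[0] == 'c'
--         result = 26  # 알파벳은 26가지 (a-z)
--
--     # 두 번째 문자부터 순회하며 계산
--     for i in range(1, len(pattern)):
--         current = pattern[i]
--         previous = pattern[i-1]
--
--         if current == 'd':  # 현재 위치가 숫자
--             if current == previous:  # 이전 위치도 숫자였다면
--                 result = (result * 9) % MOD  # 이전과 다른 숫자만 가능 (10-1=9)
--             else:
--                 result = (result * 10) % MOD  # 모든 숫자 가능
--         else:  # current == 'c', 현재 위치가 알파벳
--             if current == previous:  # 이전 위치도 알파벳이었다면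
--                 result = (result * 25) % MOD  # 이전과 다른 알파벳만 가능 (26-1=25)
--             else:
--                 result = (result * 26) % MOD  # 모든 알파벳 가능
--
--     return result
-- ===== SOURCE B (Python) =====
-- MOD = 1000000009
--
--
-- def count_license_plates(pattern):
--     # Run-length decomposition: each maximal run of one repeated character
--     # contributes base * rep^(run_length-1), accumulated mod MOD.
--     result = 1
--     i = 0
--     n = len(pattern)
--     while i < n:
--         j = i + 1
--         while j < n and pattern[j] == pattern[i]:
--             j += 1
--         base, rep = (10, 9) if pattern[i] == 'd' else (26, 25)
--         result = result * base * pow(rep, j - i - 1, MOD) % MOD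
--         i = j
--     return result
-- ===== Notes on version B (the rewrite author's own statement) =====
-- stated objective: alternative
-- what changed: Replaces the per-character loop comparing each position with its predecessor by a run-length decomposition: the pattern is split into maximal runs of one character and each run contributes base*rep^(L-1) via modular exponentiation.
import Mathlib
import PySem

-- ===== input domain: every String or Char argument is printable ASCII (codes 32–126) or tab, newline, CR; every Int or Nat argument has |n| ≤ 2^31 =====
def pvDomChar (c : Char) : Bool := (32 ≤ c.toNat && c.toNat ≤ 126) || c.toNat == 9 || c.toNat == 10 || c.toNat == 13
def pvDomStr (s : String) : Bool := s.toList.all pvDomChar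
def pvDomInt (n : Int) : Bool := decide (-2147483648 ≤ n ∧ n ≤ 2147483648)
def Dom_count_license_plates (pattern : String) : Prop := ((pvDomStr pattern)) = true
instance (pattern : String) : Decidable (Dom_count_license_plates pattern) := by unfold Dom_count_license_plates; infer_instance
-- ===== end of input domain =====

-- B replaces A's per-character previous/current loop by a run-length decomposition
-- (maximal runs of one character, each contributing base*rep^(L-1) mod 1000000009);
-- an 'alternative' decomposition, not claimed faster.

-- ===== PORT A =====
-- loop body of A's 'for i in range(1, len(pattern))' (reads pattern[i] and pattern[i-1];
-- the default char of pyGetD is never read: i is always in range)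
def pvBodyA (cs : List Char) (result : Int) (i : Int) : Int :=
  let current := PySem.List.pyGetD cs i ' '
  let previous := PySem.List.pyGetD cs (i - 1) ' '
  if current = 'd' then
    if current = previous then (result * 9) % 1000000009 else (result * 10) % 1000000009
  else
    if current = previous then (result * 25) % 1000000009 else (result * 26) % 1000000009

def count_license_plates (pattern : String) : Int :=
  let cs := pattern.toList
  -- pattern[0]: on the empty pattern A raises IndexError, excluded by Pre_ below
  let result : Int := if PySem.List.pyGetD cs 0 ' ' = 'd' then 10 else 26
  (PySem.List.pyRange 1 (cs.length : Int) 1).foldl (pvBodyA cs) result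

-- ===== PORT B =====
-- Source B's outer while-loop over maximal runs, as tail recursion on the remaining
-- suffix with the accumulator result; the inner while-loop scan for the run end is
-- takeWhile/dropWhile; pow(rep, j-i-1, MOD) = rep^(run tail length) % MOD
def pvGo : Int → List Char → Int
  | result, [] => result
  | result, c :: rest =>
    let run := rest.takeWhile (fun x => x = c)
    let base : Int := if c = 'd' then 10 else 26
    let rep : Int := if c = 'd' then 9 else 25
    pvGo (result * base * (rep ^ run.length % 1000000009) % 1000000009)
      (rest.dropWhile (fun x => x = c))
termination_by _ cs => cs.length
decreasing_by
  simp only [List.length_cons]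
  exact Nat.lt_succ_of_le (List.length_dropWhile_le _ _)

def count_license_plates_alt (pattern : String) : Int := pvGo 1 pattern.toList

-- ===== PRECONDITION & SPEC =====
-- Pre_ excludes exactly the empty pattern, on which A raises IndexError at pattern[0].
def Pre_count_license_plates (pattern : String) : Prop := pattern.toList ≠ []
instance (pattern : String) : Decidable (Pre_count_license_plates pattern) := by
  unfold Pre_count_license_plates; infer_instance

def pvWitness_count_license_plates : String := "ddxccd"

def Spec_count_license_plates (pattern : String) (out : Int) : Prop :=
  out = count_license_plates_alt pattern
instance (pattern : String) (out : Int) : Decidable (Spec_count_license_plates pattern out) := by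
  unfold Spec_count_license_plates; infer_instance

-- ===== CLAIM (what is proved, stated in full; the proofs are below) =====
def Claim_equal_count_license_plates : Prop := ∀ (pattern : String),
  Dom_count_license_plates pattern → Pre_count_license_plates pattern →
  Spec_count_license_plates pattern (count_license_plates pattern)

-- ===== LEMMAS AND PROOFS =====

-- the number of choices for a character c that follows a DIFFERENT character (or is first)
def pvFull (c : Char) : Int := if c = 'd' then 10 else 26
-- the number of choices for a character c that repeats the previous character
def pvRep (c : Char) : Int := if c = 'd' then 9 else 25

-- the exact (un-modded) product of A's factors, threading the previous character
def pvP : Char → List Char → Int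
  | _, [] => 1
  | prev, c :: rest => (if c = prev then pvRep c else pvFull c) * pvP c rest

-- the whole product for a nonempty pattern
def pvHP : List Char → Int
  | [] => 1
  | c :: rest => pvFull c * pvP c rest

-- A's loop rephrased as structural recursion over the tail, carrying the previous char
def pvStep : Char → Int → List Char → Int
  | _, acc, [] => acc
  | prev, acc, c :: rest =>
    pvStep c ((acc * (if c = prev then pvRep c else pvFull c)) % 1000000009) rest

lemma pvGetD_append_cons (pre : List Char) (c : Char) (rest : List Char) :
    PySem.List.pyGetD (pre ++ c :: rest) ((pre.length : Int)) ' ' = c := by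
  rw [show ((pre.length : Int)) = ((pre.length : Nat) : Int) by simp,
    PySem.List.pyGetD_natCast]
  simp [List.getD]

lemma pvBodyA_eq (pre : List Char) (prev c : Char) (rest : List Char) (acc : Int) :
    pvBodyA (pre ++ prev :: c :: rest) acc ((pre.length : Int) + 1) =
      (acc * (if c = prev then pvRep c else pvFull c)) % 1000000009 := by
  have hc : PySem.List.pyGetD (pre ++ prev :: c :: rest) ((pre.length : Int) + 1) ' ' = c := by
    have := pvGetD_append_cons (pre ++ [prev]) c rest
    simpa [List.append_assoc, add_comm] using this
  have hp : PySem.List.pyGetD (pre ++ prev :: c :: rest) ((pre.length : Int) + 1 - 1) ' ' = prev := by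
    simpa using pvGetD_append_cons pre prev (c :: rest)
  unfold pvBodyA
  rw [hc, hp]
  by_cases hcd : c = 'd' <;> by_cases hcp : c = prev <;>
    simp [hcd, hcp, pvRep, pvFull] <;> split_ifs <;> rfl

lemma pvFoldA (rest : List Char) : ∀ (pre : List Char) (c : Char) (acc : Int),
    (PySem.List.pyRange ((pre.length : Int) + 1)
        ((pre.length : Int) + 1 + (rest.length : Int)) 1).foldl
      (pvBodyA (pre ++ c :: rest)) acc = pvStep c acc rest := by
  induction rest with
  | nil =>
    intro pre c acc
    simp [PySem.List.pyRange_one_eq_nil, pvStep]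
  | cons r rs ih =>
    intro pre c acc
    rw [PySem.List.pyRange_one_cons (by simp only [List.length_cons]; push_cast; omega)]
    simp only [List.foldl_cons]
    rw [pvBodyA_eq pre c r rs acc]
    have h2 := ih (pre ++ [c]) r ((acc * (if r = c then pvRep r else pvFull r)) % 1000000009)
    simp only [List.length_append, List.length_cons, List.length_nil] at h2 ⊢
    push_cast at h2 ⊢
    rw [show (pre.length : Int) + 1 + 1 = (pre.length : Int) + 1 + 1 by ring] at h2
    have heq : pre ++ [c] ++ r :: rs = pre ++ c :: r :: rs := by simp
    rw [heq] at h2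
    rw [show ((pre.length : Int) + 1 + ((rs.length : Int) + 1)) =
      ((pre.length : Int) + 1 + 1 + (rs.length : Int)) by ring]
    rw [h2]
    rfl

lemma pvStep_eq (cs : List Char) : ∀ (prev : Char) (acc : Int),
    pvStep prev (acc % 1000000009) cs = (acc * pvP prev cs) % 1000000009 := by
  induction cs with
  | nil => intro prev acc; simp [pvStep, pvP]
  | cons c rest ih =>
    intro prev acc
    show pvStep c ((acc % 1000000009 * (if c = prev then pvRep c else pvFull c)) % 1000000009) rest = _
    have h : (acc % 1000000009 * (if c = prev then pvRep c else pvFull c)) % 1000000009 =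
        (acc * (if c = prev then pvRep c else pvFull c)) % 1000000009 := by
      conv_rhs => rw [Int.mul_emod]
      rw [Int.mul_emod, Int.emod_emod_of_dvd _ dvd_rfl]
    rw [h, ih]
    show _ = (acc * ((if c = prev then pvRep c else pvFull c) * pvP c rest)) % 1000000009
    ring_nf

lemma pvP_run (t : List Char) : ∀ (c : Char) (u : List Char), (∀ x ∈ t, x = c) →
    pvP c (t ++ u) = pvRep c ^ t.length * pvP c u := by
  induction t with
  | nil => intro c u _; simp
  | cons x xs ih =>
    intro c u h
    have hx : x = c := h x (by simp)
    subst hx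
    show (if x = x then pvRep x else pvFull x) * pvP x (xs ++ u) = _
    rw [if_pos rfl, ih x u (fun y hy => h y (by simp [hy]))]
    simp [pow_succ]
    ring

lemma pvP_drop (c : Char) (u : List Char) (h : u = [] ∨ ∃ d t, u = d :: t ∧ d ≠ c) :
    pvP c u = pvHP u := by
  rcases h with h | ⟨d, t, rfl, hd⟩
  · subst h; rfl
  · show (if d = c then pvRep d else pvFull d) * pvP d t = _
    rw [if_neg hd]; rfl

lemma pvDropWhile_head (p : Char → Bool) (l : List Char) (d : Char) (t : List Char)
    (h : l.dropWhile p = d :: t) : p d = false := by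
  induction l with
  | nil => simp at h
  | cons a as ih =>
    by_cases hp : p a
    · rw [List.dropWhile_cons_of_pos hp] at h
      exact ih h
    · rw [List.dropWhile_cons_of_neg hp] at h
      cases h
      simpa using hp

lemma pvGo_eq (n : Nat) : ∀ (cs : List Char), cs.length ≤ n → ∀ (acc : Int),
    pvGo (acc % 1000000009) cs = (acc * pvHP cs) % 1000000009 := by
  induction n with
  | zero =>
    intro cs h acc
    have : cs = [] := List.length_eq_zero_iff.mp (Nat.le_zero.mp h)
    subst this; simp [pvGo, pvHP]
  | succ n ih =>
    intro cs h acc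
    match cs with
    | [] => simp [pvGo, pvHP]
    | c :: rest =>
      rw [pvGo]
      have hdrop : (rest.dropWhile (fun x => x = c)).length ≤ n := by
        have := List.length_dropWhile_le (fun x => decide (x = c)) rest
        simp at h
        omega
      have hsplit : rest = rest.takeWhile (fun x => x = c) ++ rest.dropWhile (fun x => x = c) :=
        (List.takeWhile_append_dropWhile).symm
      have hrun : pvP c rest =
          pvRep c ^ (rest.takeWhile (fun x => x = c)).length *
            pvHP (rest.dropWhile (fun x => x = c)) := by
        conv_lhs => rw [hsplit]
        rw [pvP_run _ c _ (fun x hx => by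
          simpa using List.mem_takeWhile_imp (p := fun x => decide (x = c)) hx)]
        congr 1
        apply pvP_drop
        match hu : rest.dropWhile (fun x => x = c) with
        | [] => exact Or.inl rfl
        | d :: t =>
          refine Or.inr ⟨d, t, rfl, ?_⟩
          have := pvDropWhile_head (fun x => decide (x = c)) rest d t hu
          simpa using this
      have hstep : acc % 1000000009 * (if c = 'd' then (10:Int) else 26) *
          ((if c = 'd' then (9:Int) else 25) ^ (rest.takeWhile (fun x => x = c)).length % 1000000009)
          % 1000000009 =
          (acc * pvFull c * pvRep c ^ (rest.takeWhile (fun x => x = c)).length) % 1000000009 := by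
      { show acc % 1000000009 * pvFull c * (pvRep c ^ _ % 1000000009) % 1000000009 = _
        conv_rhs => rw [Int.mul_emod, Int.mul_emod acc (pvFull c)]
        rw [Int.mul_emod, Int.mul_emod (acc % 1000000009) (pvFull c),
          Int.emod_emod_of_dvd _ dvd_rfl, Int.emod_emod_of_dvd _ dvd_rfl] }
      rw [hstep, ih _ hdrop]
      have : pvHP (c :: rest) = pvFull c *
          (pvRep c ^ (rest.takeWhile (fun x => x = c)).length *
            pvHP (rest.dropWhile (fun x => x = c))) := by
        show pvFull c * pvP c rest = _
        rw [hrun]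
      rw [this]
      ring_nf

lemma pvFull_small (c : Char) : pvFull c % 1000000009 = pvFull c := by
  unfold pvFull; split_ifs <;> decide

-- ===== VERDICT (by name: the statement is the Claim_ definition above) =====
theorem count_license_plates_spec : Claim_equal_count_license_plates := by
  intro pattern _ hpre
  unfold Spec_count_license_plates count_license_plates count_license_plates_alt
  match hcs : pattern.toList with
  | [] => exact absurd hcs hpre
  | c :: rest =>
    have hinit : (if PySem.List.pyGetD (c :: rest) 0 ' ' = 'd' then (10:Int) else 26) = pvFull c := by
      rw [PySem.List.pyGetD_zero_cons]; rfl
    simp only [hinit]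
    have hfold := pvFoldA rest [] c (pvFull c)
    simp only [List.length_nil, Nat.cast_zero, zero_add, List.nil_append] at hfold
    rw [show ((c :: rest).length : Int) = 1 + (rest.length : Int) by simp; ring]
    rw [hfold, ← pvFull_small c, pvStep_eq]
    rw [show (1 : Int) = (1 : Int) % 1000000009 from rfl,
      pvGo_eq (c :: rest).length _ le_rfl 1]
    show (pvFull c * pvP c rest) % 1000000009 = (1 * pvHP (c :: rest)) % 1000000009
    rw [one_mul]
    rfl
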